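-- pv_equiv track=rewrite | github.com/yashsinha1702/countgd-patch | CountGD/final_visualiser.py | _get_ind_to_filter
-- ===== SOURCE A (Python) =====
-- def _get_ind_to_filter(text, word_ids, keywords=""):
--     """Get indices to filter predictions"""
--     if len(keywords) <= 0:
--         return list(range(len(word_ids)))
--
--     input_words = text.split()
--     keywords = [k.strip() for k in keywords.split(",")]
--
--     word_inds = []
--     for keyword in keywords:
--         if keyword in input_words:
--             if len(word_inds) <= 0:
--                 word_inds.append(input_words.index(keyword))
--             else:
--                 word_inds.append(input_words.index(keyword, word_inds[-1]))
--         else: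
--             raise Exception("Keywords must be present in input text")
--
--     return [i for i, word_id in enumerate(word_ids) if word_id in word_inds]
-- ===== SOURCE B (Python) =====
-- def _get_ind_to_filter(text, word_ids, keywords=""):
--     """Get indices to filter predictions"""
--     if len(keywords) <= 0:
--         return list(range(len(word_ids)))
--
--     kws = [k.strip() for k in keywords.split(",")]
--
--     # single left-to-right pass over the text words, consuming keywords as they appear
--     chosen = set()
--     j = 0
--     for i, w in enumerate(text.split()):
--         while j < len(kws) and kws[j] == w:
--             chosen.add(i)
--             j += 1
--     if j < len(kws):
--         raise Exception("Keywords must be present in input text")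
--
--     return [i for i, word_id in enumerate(word_ids) if word_id in chosen]
-- ===== Notes on version B (the rewrite author's own statement) =====
-- stated objective: alternative
-- what changed: B makes one left-to-right pass over the text words, consuming a pointer into the keyword list whenever the current word matches (subsequence two-pointer scan) and collecting matched positions in a set, instead of A's per-keyword repeated list.index scans from a cursor; Pre_ excludes the inputs on which A raises (keyword absent, or only present before the cursor), where B raises a single Exception.
import Mathlib
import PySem

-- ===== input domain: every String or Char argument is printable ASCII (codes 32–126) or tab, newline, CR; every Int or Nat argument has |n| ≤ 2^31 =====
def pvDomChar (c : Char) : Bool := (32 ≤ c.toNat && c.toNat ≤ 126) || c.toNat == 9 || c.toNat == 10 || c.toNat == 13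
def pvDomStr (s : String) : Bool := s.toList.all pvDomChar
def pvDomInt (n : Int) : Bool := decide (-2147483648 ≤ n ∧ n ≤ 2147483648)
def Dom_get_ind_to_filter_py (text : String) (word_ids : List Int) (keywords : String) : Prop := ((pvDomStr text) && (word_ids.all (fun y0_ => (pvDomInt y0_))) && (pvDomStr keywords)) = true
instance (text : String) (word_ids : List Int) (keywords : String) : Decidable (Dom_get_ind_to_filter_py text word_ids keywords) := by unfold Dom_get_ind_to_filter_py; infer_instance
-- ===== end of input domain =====

-- B replaces A's per-keyword repeated list.index scans by one left-to-right pass over the text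
-- words that consumes a pointer into the keyword list and collects matched positions in a set
-- (objective: alternative). Both Pythons raise when a stripped keyword cannot be matched; those
-- inputs are excluded by Pre_ below and both ports return [] there.

-- s.split(",") — the separator is the nonempty literal ",", so split? is always some
def pvSplitComma (s : String) : List String := (PySem.Str.split? s ",").getD []

-- ===== PORT A =====
-- hand port of input_words.index(keyword, start): exact for 0 ≤ start (start is always a previous list index here)
def pvIndexFrom (xs : List String) (v : String) (start : Int) : Option Int :=
  ((xs.drop start.toNat).idxOf? v).map (fun j => (j : Int) + start)

def pvFilterLoopA (ws : List String) : List String → List Int → Option (List Int)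
  | [], acc => some acc
  | k :: ks, acc =>
    if ws.contains k then
      match acc.getLast? with
      | none =>
        match ws.idxOf? k with               -- input_words.index(keyword)
        | some j => pvFilterLoopA ws ks (acc ++ [(j : Int)])
        | none => none                        -- unreachable under the guard; Python would raise
      | some last =>
        match pvIndexFrom ws k last with      -- input_words.index(keyword, word_inds[-1])
        | some j => pvFilterLoopA ws ks (acc ++ [j])
        | none => none                        -- ValueError
    else none                                 -- raise Exception(...)

def get_ind_to_filter_py (text : String) (word_ids : List Int) (keywords : String) : List Int :=
  if PySem.Str.len keywords ≤ 0 then PySem.List.pyRange 0 (word_ids.length : Int) 1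
  else
    let input_words := PySem.Str.split₀ text
    let ks := (pvSplitComma keywords).map PySem.Str.strip
    match pvFilterLoopA input_words ks [] with
    | none => []                              -- Python raises here; excluded by Pre_
    | some word_inds =>
      (PySem.List.enumerate word_ids 0).filterMap
        (fun p => if word_inds.contains p.2 then some p.1 else none)

-- ===== PORT B =====
-- the inner 'while j < len(kws) and kws[j] == w' loop: consume the leading run of keywords equal
-- to the current word w (at word index i), adding i to the chosen set for each consumed keyword
def pvConsume (w : String) (i : Int) : List String → PySem.Set Int → List String × PySem.Set Int
  | [], chosen => ([], chosen)
  | k :: ks, chosen =>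
    if k == w then pvConsume w i ks (PySem.Set.add chosen i) else (k :: ks, chosen)

def get_ind_to_filter_py_alt (text : String) (word_ids : List Int) (keywords : String) : List Int :=
  if PySem.Str.len keywords ≤ 0 then PySem.List.pyRange 0 (word_ids.length : Int) 1
  else
    let kws := (pvSplitComma keywords).map PySem.Str.strip
    -- for i, w in enumerate(text.split()): while …  (state = remaining keywords, chosen set)
    let st := (PySem.List.enumerate (PySem.Str.split₀ text) 0).foldl
      (fun st p => pvConsume p.2 p.1 st.1 st.2) (kws, PySem.Set.empty)
    if st.1.isEmpty then
      (PySem.List.enumerate word_ids 0).filterMap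
        (fun p => if PySem.Set.contains st.2 p.2 then some p.1 else none)
    else []                                   -- Python raises here; excluded by Pre_

-- ===== PRECONDITION & SPEC =====
-- Pre_: keywords is empty, or the stripped comma-separated keywords — with adjacent duplicates
-- collapsed (a repeated keyword re-matches the same position) — form a subsequence of text.split();
-- exactly there A returns; otherwise A raises (Exception for an absent keyword, ValueError for one
-- only present before the cursor).
def Pre_get_ind_to_filter_py (text : String) (word_ids : List Int) (keywords : String) : Prop :=
  PySem.Str.len keywords ≤ 0 ∨
    List.Sublist (((pvSplitComma keywords).map PySem.Str.strip).destutter (· ≠ ·))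
      (PySem.Str.split₀ text)
instance (text : String) (word_ids : List Int) (keywords : String) : Decidable (Pre_get_ind_to_filter_py text word_ids keywords) := by unfold Pre_get_ind_to_filter_py; infer_instance

def pvWitness_get_ind_to_filter_py : String × List Int × String := ("a b", ([0, 1], "b"))

def Spec_get_ind_to_filter_py (text : String) (word_ids : List Int) (keywords : String) (out : List Int) : Prop := out = get_ind_to_filter_py_alt text word_ids keywords
instance (text : String) (word_ids : List Int) (keywords : String) (out : List Int) : Decidable (Spec_get_ind_to_filter_py text word_ids keywords out) := by unfold Spec_get_ind_to_filter_py; infer_instance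

-- ===== CLAIM (what is proved, stated in full; the proofs are below) =====
def Claim_equal_get_ind_to_filter_py : Prop := ∀ (text : String) (word_ids : List Int) (keywords : String), Dom_get_ind_to_filter_py text word_ids keywords → Pre_get_ind_to_filter_py text word_ids keywords → Spec_get_ind_to_filter_py text word_ids keywords (get_ind_to_filter_py text word_ids keywords)

-- ===== LEMMAS AND PROOFS =====

-- keyword-driven greedy matcher on the word SUFFIX starting at absolute index c: the common
-- specification both loops are reduced to (A's cursor loop literally computes it; B's word scan
-- succeeds exactly when it is some, with the same chosen set)
def pvG (ws : List String) (c : Nat) : List String → Option (List Int)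
  | [] => some []
  | k :: ks =>
    match ws.idxOf? k with
    | none => none
    | some j => (pvG (ws.drop j) (c + j) ks).map (fun l => ((c + j : Nat) : Int) :: l)

-- structural form of B's foldl over the enumerated words
def pvScanRec : List String → Nat → List String → PySem.Set Int → List String × PySem.Set Int
  | [], _, pending, chosen => (pending, chosen)
  | w :: ws, i, pending, chosen =>
    let st := pvConsume w (i : Int) pending chosen
    pvScanRec ws (i + 1) st.1 st.2

lemma foldl_enum_scan (ws : List String) : ∀ (i : Nat) (pending : List String) (chosen : PySem.Set Int),
    (PySem.List.enumerate ws (i : Int)).foldl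
      (fun st p => pvConsume p.2 p.1 st.1 st.2) (pending, chosen) = pvScanRec ws i pending chosen := by
  induction ws with
  | nil => intro i pending chosen; rfl
  | cons w ws ih =>
    intro i pending chosen
    rw [PySem.List.enumerate_cons]
    show (PySem.List.enumerate ws ((i : Int) + 1)).foldl _ (pvConsume w (i : Int) pending chosen) = _
    have hc : ((i : Int) + 1) = ((i + 1 : Nat) : Int) := by push_cast; ring
    rw [hc]
    show (PySem.List.enumerate ws ((i + 1 : Nat) : Int)).foldl _
        ((pvConsume w (i : Int) pending chosen).1, (pvConsume w (i : Int) pending chosen).2) = _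
    rw [ih (i + 1)]
    rfl

lemma scanRec_nil_pending (ws : List String) : ∀ (i : Nat) (chosen : PySem.Set Int),
    pvScanRec ws i [] chosen = ([], chosen) := by
  induction ws with
  | nil => intro i chosen; rfl
  | cons w ws ih => intro i chosen; exact ih (i + 1) chosen

lemma loopA_eq_G : ∀ (ks : List String) (ws : List String) (acc : List Int) (c : Nat),
    (acc.getLast?).getD 0 = (c : Int) →
    pvFilterLoopA ws ks acc = (pvG (ws.drop c) c ks).map (fun l => acc ++ l) := by
  intro ks
  induction ks with
  | nil => intro ws acc c _; simp [pvFilterLoopA, pvG]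
  | cons k ks ih =>
    intro ws acc c hc
    simp only [pvFilterLoopA, pvG]
    cases hidx : (ws.drop c).idxOf? k with
    | none =>
      have hnot : k ∉ ws.drop c := List.idxOf?_eq_none_iff.mp hidx
      by_cases hin : k ∈ ws
      · rw [if_pos (by simpa using hin)]
        cases hlast : acc.getLast? with
        | none =>
          have hc0 : c = 0 := by rw [hlast] at hc; simpa using hc.symm
          subst hc0
          rw [List.drop_zero] at hidx
          simp [hidx]
        | some last =>
          have hlc : last = (c : Int) := by rw [hlast] at hc; simpa using hc
          subst hlc
          simp [pvIndexFrom, hidx]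
      · rw [if_neg (by simpa using hin)]
        simp
    | some j =>
      have hmemd : k ∈ ws.drop c := by
        by_cases hk : k ∈ ws.drop c
        · exact hk
        · rw [List.idxOf?_eq_none_iff.mpr hk] at hidx; cases hidx
      have hmem : k ∈ ws := List.mem_of_mem_drop hmemd
      rw [if_pos (by simpa using hmem)]
      have hdrop : (ws.drop c).drop j = ws.drop (c + j) := by
        simp [List.drop_drop]
      cases hlast : acc.getLast? with
      | none =>
        have hc0 : c = 0 := by
          rw [hlast] at hc; simpa using hc.symm
        subst hc0
        rw [List.drop_zero] at hidx
        rw [hidx]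
        dsimp only
        simp only [Nat.zero_add, List.drop_zero]
        have ihc := ih ws (acc ++ [(j : Int)]) j
          (by rw [List.getLast?_concat]; simp)
        rw [ihc]
        cases pvG (ws.drop j) j ks <;> simp
      | some last =>
        have hlc : last = (c : Int) := by rw [hlast] at hc; simpa using hc
        subst hlc
        simp [pvIndexFrom, hidx]
        have ihc := ih ws (acc ++ [(j : Int) + (c : Int)]) (c + j)
          (by rw [List.getLast?_concat]; simp; push_cast; ring)
        rw [ihc]
        cases pvG (ws.drop (c + j)) (c + j) ks <;> simp [Int.add_comm]

lemma scan_G : ∀ (n : Nat) (ws ks : List String), ws.length + ks.length ≤ n →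
    ∀ (i : Nat) (chosen : PySem.Set Int),
    (match pvG ws i ks with
     | some l => (pvScanRec ws i ks chosen).1 = [] ∧
         (∀ x, x ∈ (pvScanRec ws i ks chosen).2 ↔ x ∈ chosen ∨ x ∈ l)
     | none => (pvScanRec ws i ks chosen).1 ≠ []) := by
  intro n
  induction n with
  | zero =>
    intro ws ks h i chosen
    have hws : ws = [] := List.length_eq_zero_iff.mp (by omega)
    have hks : ks = [] := List.length_eq_zero_iff.mp (by omega)
    subst hws; subst hks
    simp [pvG, pvScanRec]
  | succ n ihn =>
    intro ws ks h i chosen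
    cases ws with
    | nil =>
      cases ks with
      | nil => simp [pvG, pvScanRec]
      | cons k ks' => simp [pvG, pvScanRec]
    | cons w ws' =>
      cases ks with
      | nil =>
        have : pvScanRec (w :: ws') i [] chosen = ([], chosen) := scanRec_nil_pending _ i chosen
        rw [this]
        simp [pvG]
      | cons k ks' =>
        by_cases hkw : k = w
        · subst hkw
          have hstep : pvScanRec (k :: ws') i (k :: ks') chosen
              = pvScanRec (k :: ws') i ks' (PySem.Set.add chosen (i : Int)) := by
            show pvScanRec ws' (i + 1) (pvConsume k (i : Int) (k :: ks') chosen).1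
                  (pvConsume k (i : Int) (k :: ks') chosen).2 = _
            simp only [pvConsume, BEq.rfl, if_pos]
            rfl
          have hG : pvG (k :: ws') i (k :: ks')
              = (pvG (k :: ws') i ks').map (fun l => ((i : Nat) : Int) :: l) := by
            simp [pvG, List.idxOf?_cons]
          rw [hstep, hG]
          have ihc := ihn (k :: ws') ks' (by simp at h ⊢; omega) i (PySem.Set.add chosen (i : Int))
          cases hg : pvG (k :: ws') i ks' with
          | none => rw [hg] at ihc; simpa using ihc
          | some l =>
            rw [hg] at ihc
            obtain ⟨h1, h2⟩ := ihc
            refine ⟨h1, fun x => ?_⟩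
            rw [h2 x, PySem.Set.mem_add, List.mem_cons]
            tauto
        · have hstep : pvScanRec (w :: ws') i (k :: ks') chosen
              = pvScanRec ws' (i + 1) (k :: ks') chosen := by
            show pvScanRec ws' (i + 1) (pvConsume w (i : Int) (k :: ks') chosen).1
                  (pvConsume w (i : Int) (k :: ks') chosen).2 = _
            have hb : (k == w) = false := by simpa using hkw
            simp only [pvConsume, hb, Bool.false_eq_true, if_false]
          have ihc := ihn ws' (k :: ks') (by simp at h ⊢; omega) (i + 1) chosen
          cases hidx : ws'.idxOf? k with
          | none =>
            have hG : pvG (w :: ws') i (k :: ks') = none := by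
              have : (w :: ws').idxOf? k = none := by
                simp [List.idxOf?_cons, hidx, (by simpa using (Ne.symm hkw) : (w == k) = false)]
              simp [pvG, this]
            have hG' : pvG ws' (i + 1) (k :: ks') = none := by simp [pvG, hidx]
            rw [hG]; rw [hG'] at ihc
            rw [hstep]; exact ihc
          | some j' =>
            have hG : pvG (w :: ws') i (k :: ks')
                = (pvG (ws'.drop j') (i + (j' + 1)) ks').map
                    (fun l => ((i + (j' + 1) : Nat) : Int) :: l) := by
              have hix : (w :: ws').idxOf? k = some (j' + 1) := by
                simp [List.idxOf?_cons, hidx, (by simpa using (Ne.symm hkw) : (w == k) = false)]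
              simp [pvG, hix, List.drop_succ_cons]
            have hG' : pvG ws' (i + 1) (k :: ks')
                = (pvG (ws'.drop j') ((i + 1) + j') ks').map
                    (fun l => (((i + 1) + j' : Nat) : Int) :: l) := by
              simp [pvG, hidx]
            have harith : i + (j' + 1) = (i + 1) + j' := by omega
            rw [hG, harith]
            rw [hG'] at ihc
            rw [hstep]
            exact ihc

lemma filterMap_mem_eq (l : List (Int × Int)) (a b : List Int) (h : ∀ x, x ∈ b ↔ x ∈ a) :
    l.filterMap (fun p => if a.contains p.2 then some p.1 else none) =
      l.filterMap (fun p => if PySem.Set.contains b p.2 then some p.1 else none) := by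
  induction l with
  | nil => rfl
  | cons p l ihl =>
    simp only [List.filterMap_cons]
    have hc : PySem.Set.contains b p.2 = a.contains p.2 := by
      cases hb : PySem.Set.contains b p.2 <;> cases ha : a.contains p.2 <;> try rfl
      · exfalso
        have hpa : p.2 ∈ a := by simpa using ha
        have hpb : p.2 ∈ b := (h p.2).mpr hpa
        have := (PySem.Set.contains_iff b p.2)
        rw [hb] at this
        simp at this
        exact this hpb
      · exfalso
        have hpb : p.2 ∈ b := (PySem.Set.contains_iff b p.2).mp hb
        have hpa : p.2 ∈ a := (h p.2).mp hpb
        simp at ha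
        exact ha hpa
    rw [hc, ihl]

-- ===== VERDICT (by name: the statement is the Claim_ definition above) =====
theorem get_ind_to_filter_py_spec : Claim_equal_get_ind_to_filter_py := by
  unfold Claim_equal_get_ind_to_filter_py
  intro text word_ids keywords _hdom _hpre
  unfold Spec_get_ind_to_filter_py get_ind_to_filter_py get_ind_to_filter_py_alt
  by_cases h : PySem.Str.len keywords ≤ 0
  · rw [if_pos h, if_pos h]
  · rw [if_neg h, if_neg h]
    set ws := PySem.Str.split₀ text with hws
    set kws := (pvSplitComma keywords).map PySem.Str.strip with hkws
    have hA : pvFilterLoopA ws kws [] = pvG ws 0 kws := by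
      have := loopA_eq_G kws ws [] 0 (by simp)
      rw [this, List.drop_zero]
      cases pvG ws 0 kws <;> simp
    have hscan : (PySem.List.enumerate ws 0).foldl
        (fun st p => pvConsume p.2 p.1 st.1 st.2) (kws, PySem.Set.empty)
        = pvScanRec ws 0 kws PySem.Set.empty := by
      have := foldl_enum_scan ws 0 kws PySem.Set.empty
      simpa using this
    have hSG := scan_G (ws.length + kws.length) ws kws le_rfl 0 PySem.Set.empty
    show (match pvFilterLoopA ws kws [] with
      | none => ([] : List Int)
      | some word_inds => (PySem.List.enumerate word_ids 0).filterMap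
          (fun p : Int × Int => if word_inds.contains p.2 then some p.1 else none)) =
      (if ((PySem.List.enumerate ws 0).foldl
            (fun st p => pvConsume p.2 p.1 st.1 st.2) (kws, PySem.Set.empty)).1.isEmpty then
        (PySem.List.enumerate word_ids 0).filterMap
          (fun p : Int × Int => if PySem.Set.contains ((PySem.List.enumerate ws 0).foldl
            (fun st p => pvConsume p.2 p.1 st.1 st.2) (kws, PySem.Set.empty)).2 p.2
            then some p.1 else none)
      else [])
    rw [hA, hscan]
    cases hg : pvG ws 0 kws with
    | none =>
      rw [hg] at hSG
      have : (pvScanRec ws 0 kws PySem.Set.empty).1.isEmpty = false := by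
        cases hp : (pvScanRec ws 0 kws PySem.Set.empty).1
        · exact absurd hp hSG
        · rfl
      rw [this]
      simp
    | some l =>
      rw [hg] at hSG
      obtain ⟨h1, h2⟩ := hSG
      rw [h1]
      simp only [List.isEmpty_nil, if_pos]
      exact filterMap_mem_eq _ l _ (fun x => by rw [h2 x]; simp [PySem.Set.empty])
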